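-- pv_equiv track=rewrite | github.com/ArthV/Torlike | keneth/shallot/src/classes/Dijkstra.py | minDistance
-- ===== SOURCE A (Python) =====
-- def minDistance(dist, queue):
--     # IInitialize min value and min_index as -1
--     minimum = float("Inf")
--     min_index = -1
--     # Find from the dist array, min value which is till in queue
--     for i in range(len(dist)):
--         if dist[i] < minimum and i in queue:
--             minimum = dist[i]
--             min_index = i
--     return min_index
-- ===== SOURCE B (Python) =====
-- def minDistance(dist, queue):
--     # Stage 1: the smallest distance among queued indices (or no candidate at all).
--     qd = [d for i, d in enumerate(dist) if i in queue]
--     if not qd: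
--         return -1
--     m = min(qd)
--     # Stage 2: the first queued index holding that minimum distance.
--     # (Always found: m is the distance of some queued index.)
--     for i, d in enumerate(dist):
--         if d == m and i in queue:
--             return i
-- ===== Notes on version B (the rewrite author's own statement) =====
-- stated objective: alternative
-- what changed: B is staged: one pass computes the minimum distance value among queued indices, a second pass returns the first queued index holding that value, replacing A's single argmin-accumulator scan.
import Mathlib
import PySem

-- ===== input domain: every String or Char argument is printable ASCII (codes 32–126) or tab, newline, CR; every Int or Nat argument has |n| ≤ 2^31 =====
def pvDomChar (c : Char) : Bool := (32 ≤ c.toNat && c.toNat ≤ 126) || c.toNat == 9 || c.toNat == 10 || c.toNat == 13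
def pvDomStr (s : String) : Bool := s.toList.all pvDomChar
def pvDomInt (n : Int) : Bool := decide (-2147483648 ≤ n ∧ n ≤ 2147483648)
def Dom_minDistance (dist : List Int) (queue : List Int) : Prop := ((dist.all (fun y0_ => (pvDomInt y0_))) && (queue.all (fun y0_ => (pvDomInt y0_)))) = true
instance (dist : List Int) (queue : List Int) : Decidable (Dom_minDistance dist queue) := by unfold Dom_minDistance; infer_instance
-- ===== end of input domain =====

-- B is staged: one pass computes the minimum distance value among queued indices,
-- a second pass returns the first queued index holding that value, replacing A's
-- single argmin-accumulator scan (objective: alternative).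

-- ===== PORT A =====
-- minimum : Option Int, none = float("Inf") (exact: all compared values are ints,
-- and every int is < Inf). dist[i] with 0 ≤ i < len(dist) is exact via pyGetD.
def pvStepA (dist : List Int) (queue : List Int) (st : Option Int × Int) (i : Int) :
    Option Int × Int :=
  let d := PySem.List.pyGetD dist i 0
  if ((match st.1 with | none => true | some m => decide (d < m)) &&
      decide (i ∈ queue)) then (some d, i) else st

def minDistance (dist : List Int) (queue : List Int) : Int :=
  ((PySem.List.pyRange 0 dist.length 1).foldl (pvStepA dist queue)
    ((none : Option Int), -1)).2

-- ===== PORT B =====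
-- qd = [d for i, d in enumerate(dist) if i in queue]; 'if not qd: return -1' and
-- 'm = min(qd)' are the none/some cases of min? (min? = none ↔ the list is empty).
-- The final for-loop with early return is find?; its fall-through is unreachable
-- in the Python (m is the distance of some queued index), ported as -1.
def minDistance_alt (dist : List Int) (queue : List Int) : Int :=
  let qd := (PySem.List.enumerate dist 0).filterMap
    (fun p => if decide (p.1 ∈ queue) then some p.2 else none)
  match PySem.List.min? qd (fun v => v) with
  | none => -1
  | some m =>
    match (PySem.List.enumerate dist 0).find?
        (fun p => decide (p.2 = m) && decide (p.1 ∈ queue)) with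
    | some p => p.1
    | none => -1

-- ===== PRECONDITION & SPEC =====
def Spec_minDistance (dist : List Int) (queue : List Int) (out : Int) : Prop := out = minDistance_alt dist queue
instance (dist : List Int) (queue : List Int) (out : Int) : Decidable (Spec_minDistance dist queue out) := by unfold Spec_minDistance; infer_instance

-- ===== CLAIM (what is proved, stated in full; the proofs are below) =====
def Claim_equal_minDistance : Prop := ∀ (dist : List Int) (queue : List Int), Dom_minDistance dist queue → Spec_minDistance dist queue (minDistance dist queue)

-- ===== LEMMAS AND PROOFS =====

-- lexicographic minimum of two (distance, index) pairs, first-wins on full ties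
def pvPairMin (p q : Int × Int) : Int × Int :=
  if q.1 < p.1 ∨ (q.1 = p.1 ∧ q.2 < p.2) then q else p

-- eligible candidates among indices [0, n)
def pvCand (dist : List Int) (queue : List Int) (j : Int) : Option (Int × Int) :=
  if decide (j ∈ queue) then some (PySem.List.pyGetD dist j 0, j) else none

def pvCands (dist : List Int) (queue : List Int) (n : Nat) : List (Int × Int) :=
  (PySem.List.pyRange 0 n 1).filterMap (pvCand dist queue)

def pvMin? : List (Int × Int) → Option (Int × Int)
  | [] => none
  | c :: cs => some (cs.foldl pvPairMin c)

def pvLexLE (r x : Int × Int) : Prop := r.1 < x.1 ∨ (r.1 = x.1 ∧ r.2 ≤ x.2)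

theorem pvPairMin_le_left (p q : Int × Int) : pvLexLE (pvPairMin p q) p := by
  unfold pvPairMin pvLexLE; split_ifs with h <;> omega

theorem pvPairMin_le_right (p q : Int × Int) : pvLexLE (pvPairMin p q) q := by
  unfold pvPairMin pvLexLE; split_ifs with h <;> omega

theorem pvLexLE_trans {a b c : Int × Int} (h1 : pvLexLE a b) (h2 : pvLexLE b c) :
    pvLexLE a c := by
  unfold pvLexLE at *; omega

theorem pvFoldl_mem (cs : List (Int × Int)) (c : Int × Int) :
    cs.foldl pvPairMin c ∈ c :: cs := by
  induction cs generalizing c with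
  | nil => simp
  | cons c' cs ih =>
    simp only [List.foldl_cons]
    rcases List.mem_cons.mp (ih (pvPairMin c c')) with h1 | h1
    · rw [h1]; unfold pvPairMin; split_ifs <;> simp
    · simp [List.mem_cons, h1]

theorem pvFoldl_isMin (cs : List (Int × Int)) (c : Int × Int) :
    ∀ x ∈ c :: cs, pvLexLE (cs.foldl pvPairMin c) x := by
  induction cs generalizing c with
  | nil => intro x hx; simp at hx; subst hx; exact Or.inr ⟨rfl, le_refl _⟩
  | cons c' cs ih =>
    intro x hx
    simp only [List.foldl_cons]
    rcases List.mem_cons.mp hx with h | h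
    · rw [h]
      exact pvLexLE_trans (ih (pvPairMin c c') _ (List.mem_cons_self ..))
        (pvPairMin_le_left c c')
    · rcases List.mem_cons.mp h with h | h
      · rw [h]
        exact pvLexLE_trans (ih (pvPairMin c c') _ (List.mem_cons_self ..))
          (pvPairMin_le_right c c')
      · exact ih (pvPairMin c c') _ (List.mem_cons_of_mem _ h)

theorem pvMin?_mem {xs : List (Int × Int)} {m : Int × Int}
    (h : pvMin? xs = some m) : m ∈ xs := by
  cases xs with
  | nil => simp [pvMin?] at h
  | cons c cs =>
    simp only [pvMin?, Option.some.injEq] at h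
    subst h; exact pvFoldl_mem cs c

theorem pvCands_snd_lt (dist queue : List Int) (n : Nat) :
    ∀ p ∈ pvCands dist queue n, p.2 < (n : Int) := by
  intro p hp
  rcases List.mem_filterMap.mp hp with ⟨j, hj, hjp⟩
  have hjn : 0 ≤ j ∧ j < (n : Int) := (PySem.List.mem_pyRange_one).mp hj
  unfold pvCand at hjp
  by_cases hq : j ∈ queue
  · simp [hq] at hjp; subst hjp; exact hjn.2
  · simp [hq] at hjp

theorem pvCands_succ (dist queue : List Int) (n : Nat) :
    pvCands dist queue (n + 1) =
      pvCands dist queue n ++ (pvCand dist queue n).toList := by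
  unfold pvCands
  rw [show ((n + 1 : Nat) : Int) = (n : Int) + 1 by push_cast; ring,
      PySem.List.pyRange_one_succ_right (by positivity)]
  rw [List.filterMap_append]
  cases h : pvCand dist queue (n : Int) <;> simp [h]

-- candidate indices are strictly increasing along the list
theorem pvCands_pairwise (dist queue : List Int) (n : Nat) :
    (pvCands dist queue n).Pairwise (fun a b => a.2 < b.2) := by
  induction n with
  | zero => simp [pvCands]
  | succ n ih =>
    rw [pvCands_succ]
    refine List.pairwise_append.mpr ⟨ih, ?_, ?_⟩
    · unfold pvCand
      by_cases hq : (n : Int) ∈ queue <;> simp [hq]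
    · intro a ha b hb
      have ha' := pvCands_snd_lt dist queue n a ha
      unfold pvCand at hb
      by_cases hq : (n : Int) ∈ queue
      · simp [hq] at hb; rw [hb]; exact ha'
      · simp [hq] at hb

theorem pvCore (dist queue : List Int) (n : Nat) :
    (PySem.List.pyRange 0 n 1).foldl (pvStepA dist queue)
        ((none : Option Int), -1) =
      (match pvMin? (pvCands dist queue n) with
       | none => ((none : Option Int), (-1 : Int))
       | some m => (some m.1, m.2)) := by
  induction n with
  | zero => simp [pvCands, pvMin?]
  | succ n ih =>
    rw [show ((n + 1 : Nat) : Int) = (n : Int) + 1 by push_cast; ring,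
        PySem.List.pyRange_one_succ_right (by positivity),
        List.foldl_append, ih, pvCands_succ]
    by_cases hq : (n : Int) ∈ queue
    · rw [show (pvCand dist queue (n : Int)).toList =
          [(PySem.List.pyGetD dist (n : Int) 0, (n : Int))] by simp [pvCand, hq]]
      cases hm : pvMin? (pvCands dist queue n) with
      | none =>
        cases hc : pvCands dist queue n with
        | nil => simp [pvMin?, pvStepA, hq]
        | cons c cs => rw [hc] at hm; simp [pvMin?] at hm
      | some m =>
        have hm2 : m.2 < (n : Int) :=
          pvCands_snd_lt dist queue n m (pvMin?_mem hm)
        cases hc : pvCands dist queue n with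
        | nil => rw [hc] at hm; simp [pvMin?] at hm
        | cons c cs =>
          rw [hc] at hm
          simp only [pvMin?, Option.some.injEq] at hm
          simp only [pvMin?, pvStepA, List.cons_append, List.foldl_append,
            List.foldl_cons, List.foldl_nil, decide_eq_true hq, Bool.and_true]
          rw [hm]
          unfold pvPairMin
          split_ifs <;> first | rfl | (simp_all; omega) | simp_all | omega
    · rw [show (pvCand dist queue (n : Int)).toList = [] by simp [pvCand, hq]]
      simp [pvStepA, hq]

-- B's candidate values are the fst-projection of the candidate pairs
theorem pvQd_eq (dist queue : List Int) :
    (PySem.List.enumerate dist 0).filterMap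
        (fun p => if decide (p.1 ∈ queue) then some p.2 else none) =
      (pvCands dist queue dist.length).map Prod.fst := by
  unfold pvCands pvCand
  rw [PySem.List.enumerate_eq_map_pyRange (d := 0), List.filterMap_map,
      ← List.filterMap_eq_map, List.filterMap_filterMap]
  simp only [PySem.List.len_eq]
  congr 1
  funext j
  by_cases hq : j ∈ queue <;> simp [hq]

-- running min of a list of ints = fst of the lexicographic pair fold
theorem pvFoldl_fst (cs : List (Int × Int)) (c : Int × Int) :
    (cs.foldl pvPairMin c).1 = (cs.map Prod.fst).foldl min c.1 := by
  induction cs generalizing c with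
  | nil => rfl
  | cons c' cs ih =>
    simp only [List.foldl_cons, List.map_cons, ih]
    congr 1
    unfold pvPairMin
    split_ifs with h
    · rcases h with h | h
      · omega
      · omega
    · push_neg at h; rcases lt_or_eq_of_le h.1 with h1 | h1 <;> omega

-- first match of B's search loop, phrased over the candidate pairs
theorem pvFind_eq (queue : List Int) (m : Int) (xs : List (Int × Int)) :
    xs.find? (fun p => decide (p.2 = m) && decide (p.1 ∈ queue)) =
      ((xs.filterMap (fun p =>
          if decide (p.1 ∈ queue) then some (p.2, p.1) else none)).find?
        (fun c => decide (c.1 = m))).map (fun c => (c.2, c.1)) := by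
  induction xs with
  | nil => simp
  | cons x xs ih =>
    by_cases hq : x.1 ∈ queue
    · by_cases hv : x.2 = m
      · simp [List.find?_cons, hq, hv]
        rw [← hv]
      · simp [List.find?_cons, hq, hv, ih]
    · simp [List.find?_cons, hq, ih]

-- find? of the fst-minimal pair in an snd-increasing list is that pair
theorem pvFind_min (cs : List (Int × Int)) (r : Int × Int)
    (hp : cs.Pairwise (fun a b => a.2 < b.2))
    (hr : r ∈ cs) (hmin : ∀ x ∈ cs, pvLexLE r x) :
    cs.find? (fun c => decide (c.1 = r.1)) = some r := by
  induction cs with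
  | nil => simp at hr
  | cons x xs ih =>
    by_cases hv : x.1 = r.1
    · have hxr : x = r := by
        rcases List.mem_cons.mp hr with h | h
        · exact h.symm
        · exfalso
          have hlt : x.2 < r.2 := (List.pairwise_cons.mp hp).1 r h
          have := hmin x (List.mem_cons_self ..)
          unfold pvLexLE at this
          omega
      simp [List.find?_cons, hv, hxr]
    · have hr' : r ∈ xs := by
        rcases List.mem_cons.mp hr with h | h
        · exact absurd (congrArg Prod.fst h).symm hv
        · exact h
      rw [List.find?_cons]
      simp only [hv, decide_false]
      exact ih (List.pairwise_cons.mp hp).2 hr'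
        (fun y hy => hmin y (List.mem_cons_of_mem _ hy))

-- B's search space, composed, is exactly the candidate pair list
theorem pvCands_eq (dist queue : List Int) :
    (PySem.List.enumerate dist 0).filterMap
        (fun p => if decide (p.1 ∈ queue) then some (p.2, p.1) else none) =
      pvCands dist queue dist.length := by
  rw [PySem.List.enumerate_eq_map_pyRange (d := 0), List.filterMap_map]
  unfold pvCands pvCand
  simp [PySem.List.len_eq]

-- ===== VERDICT (by name: the statement is the Claim_ definition above) =====
theorem minDistance_spec : Claim_equal_minDistance := by
  intro dist queue _
  unfold Spec_minDistance minDistance minDistance_alt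
  rw [pvCore, pvQd_eq]
  cases hc : pvCands dist queue dist.length with
  | nil =>
    have hq : (PySem.List.min? ([] : List Int) fun v => v) = none :=
      (PySem.List.min?_eq_none_iff _ _).mpr rfl
    simp [pvMin?, hq]
  | cons c cs =>
    have hpw : (c :: cs).Pairwise (fun a b => a.2 < b.2) := by
      rw [← hc]; exact pvCands_pairwise dist queue dist.length
    have hmem : (cs.foldl pvPairMin c) ∈ c :: cs := pvFoldl_mem cs c
    have hmin := pvFoldl_isMin cs c
    have hminq : PySem.List.min? ((c :: cs).map Prod.fst) (fun v => v) =
        some (cs.foldl pvPairMin c).1 := by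
      rw [List.map_cons, PySem.List.min?_id_cons, pvFoldl_fst]
    have hfind : (PySem.List.enumerate dist 0).find?
        (fun p => decide (p.2 = (cs.foldl pvPairMin c).1) && decide (p.1 ∈ queue)) =
          some ((cs.foldl pvPairMin c).2, (cs.foldl pvPairMin c).1) := by
      rw [pvFind_eq, pvCands_eq, hc,
          pvFind_min (c :: cs) (cs.foldl pvPairMin c) hpw hmem hmin]
      rfl
    simp only [pvMin?, hminq, hfind]
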